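-- pv_equiv track=rewrite | github.com/jjyunlp/STAD | src/exp_analysis/ambiguous_data_and_relation_number_analysis.py | count_relation_pair
-- ===== SOURCE A (Python) =====
-- def count_relation_pair(superset_list):
--     pair2count = {}
--     for superset in superset_list:
--         for i in range(len(superset)):
--             for j in range(i+1, len(superset)):
--                 a = superset[i]
--                 b = superset[j]
--                 relation_pair = a + "#" + b
--                 if relation_pair not in pair2count:
--                     pair2count[relation_pair] = 1
--                 else:
--                     pair2count[relation_pair] += 1
--                 # 反过来计算下，省的搞错
--                 relation_pair = b + "#" + a
--                 if relation_pair not in pair2count: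
--                     pair2count[relation_pair] = 1
--                 else:
--                     pair2count[relation_pair] += 1
--     pair2count = {k: v for k, v in sorted(pair2count.items(), key=lambda item: item[1], reverse=True)}
--     return pair2count
-- ===== SOURCE B (Python) =====
-- def count_relation_pair(superset_list):
--     # Count each unordered co-occurrence once, keyed by the (a, b) tuple of its
--     # first-encounter orientation, then expand each entry into the two directed
--     # '#'-joined keys (2*v for a self pair) before the final sort.
--     pair_count = {}
--     for superset in superset_list:
--         for i, a in enumerate(superset):
--             for b in superset[i + 1:]:
--                 if (a, b) in pair_count:
--                     pair_count[(a, b)] += 1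
--                 elif (b, a) in pair_count:
--                     pair_count[(b, a)] += 1
--                 else:
--                     pair_count[(a, b)] = 1
--     directed = {}
--     for (a, b), v in pair_count.items():
--         if a == b:
--             directed[a + "#" + b] = 2 * v
--         else:
--             directed[a + "#" + b] = v
--             directed[b + "#" + a] = v
--     return dict(sorted(directed.items(), key=lambda item: item[1], reverse=True))
-- ===== Notes on version B (the rewrite author's own statement) =====
-- stated objective: alternative
-- what changed: B maintains a different data structure: one counter entry per unordered co-occurring pair, keyed by the (a,b) tuple of its first-encounter orientation (one membership-canonicalised update per position pair instead of A's two directed string-key updates), and only afterwards expands each entry into the two directed 'a#b'/'b#a' keys (2*v for a self pair) before the same value-descending sort.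
-- outside the precondition, e.g. on count_relation_pair([['#', '']]): A returns {'##': 2}, B returns {'##': 1}
import Mathlib
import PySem

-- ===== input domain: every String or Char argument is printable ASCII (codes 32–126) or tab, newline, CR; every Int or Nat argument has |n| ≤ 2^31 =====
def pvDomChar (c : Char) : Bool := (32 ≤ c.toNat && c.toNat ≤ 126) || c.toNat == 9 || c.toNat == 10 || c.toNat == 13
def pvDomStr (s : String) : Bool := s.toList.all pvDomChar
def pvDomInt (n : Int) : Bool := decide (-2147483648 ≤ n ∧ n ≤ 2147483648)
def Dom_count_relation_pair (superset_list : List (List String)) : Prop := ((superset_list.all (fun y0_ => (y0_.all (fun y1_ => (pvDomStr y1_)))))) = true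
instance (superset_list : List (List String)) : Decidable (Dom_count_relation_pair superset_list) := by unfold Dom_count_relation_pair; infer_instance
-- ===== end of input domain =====

-- B maintains one counter entry per unordered co-occurring pair, keyed by the (a,b) tuple of its
-- first-encounter orientation (one membership-canonicalised update per position pair instead of A's
-- two directed string-key updates), and expands each entry into the two directed '#'-joined keys
-- (2*v for a self pair) only before the final sort (alternative data structure, same cost).


-- ===== PORT A =====
-- the repeated "if relation_pair not in pair2count: =1 else: +=1" block of A, verbatim
def pvCountKey (d : PySem.Dict String Int) (k : String) : PySem.Dict String Int :=
  if d.contains k = false then d.insert k 1 else d.insert k (d.getD k 0 + 1)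

def count_relation_pair (superset_list : List (List String)) : List (String × Int) :=
  let pair2count :=
    superset_list.foldl (fun d superset =>
      (PySem.List.pyRange 0 (superset.length : Int) 1).foldl (fun d i =>
        (PySem.List.pyRange (i + 1) (superset.length : Int) 1).foldl (fun d j =>
          let a := PySem.List.pyGetD superset i ""   -- i, j produced by range(len): always in range
          let b := PySem.List.pyGetD superset j ""
          pvCountKey (pvCountKey d (a ++ "#" ++ b)) (b ++ "#" ++ a)) d) d)
      PySem.Dict.empty
  (PySem.Dict.ofList (PySem.List.sorted pair2count.items (fun item => item.2) true)).items

-- ===== PORT B =====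
-- the canonicalising three-branch counting update of Source B, verbatim
def pvCanonStep (d : PySem.Dict (String × String) Int) (a b : String) : PySem.Dict (String × String) Int :=
  if d.contains (a, b) then d.insert (a, b) (d.getD (a, b) 0 + 1)
  else if d.contains (b, a) then d.insert (b, a) (d.getD (b, a) 0 + 1)
  else d.insert (a, b) 1

def count_relation_pair_alt (superset_list : List (List String)) : List (String × Int) :=
  let pair_count :=
    superset_list.foldl (fun d superset =>
      (PySem.List.enumerate superset).foldl (fun d ia =>
        (PySem.List.slice superset (some (ia.1 + 1)) none).foldl (fun d b =>
          pvCanonStep d ia.2 b) d) d)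
      PySem.Dict.empty
  let directed :=
    pair_count.items.foldl (fun d pv =>
      if pv.1.1 == pv.1.2 then d.insert (pv.1.1 ++ "#" ++ pv.1.2) (2 * pv.2)
      else (d.insert (pv.1.1 ++ "#" ++ pv.1.2) pv.2).insert (pv.1.2 ++ "#" ++ pv.1.1) pv.2)
      PySem.Dict.empty
  (PySem.Dict.ofList (PySem.List.sorted directed.items (fun item => item.2) true)).items

-- ===== PRECONDITION & SPEC =====
-- the '#'-joined key of a directed relation pair
def pvKey (a b : String) : String := a ++ "#" ++ b

-- the ordered distinct-position pairs of one superset, in A's triangular traversal order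
def pvTri : List String → List (String × String)
  | [] => []
  | a :: r => r.map (fun b => (a, b)) ++ pvTri r

-- all directed co-occurring pairs of the input (both orientations)
def pvDir (superset_list : List (List String)) : List (String × String) :=
  (superset_list.flatMap pvTri).flatMap (fun p => [p, (p.2, p.1)])

-- Pre_ excludes lists in which two DISTINCT directed co-occurring relation pairs concatenate to
-- the same 'a#b' key (possible only when a relation name itself contains the '#' separator):
-- there A merges unrelated pairs into one count, an artefact of the string encoding, and
-- neither A's merged counts nor B's per-pair counts are specified behaviour.
def Pre_count_relation_pair (superset_list : List (List String)) : Prop :=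
  ∀ p ∈ pvDir superset_list, ∀ q ∈ pvDir superset_list,
    pvKey p.1 p.2 = pvKey q.1 q.2 → p = q
instance (superset_list : List (List String)) : Decidable (Pre_count_relation_pair superset_list) := by unfold Pre_count_relation_pair; infer_instance

def pvWitness_count_relation_pair : List (List String) := [["a", "b", "a"], ["b", "c"]]

def Spec_count_relation_pair (superset_list : List (List String)) (out : List (String × Int)) : Prop := out = count_relation_pair_alt superset_list
instance (superset_list : List (List String)) (out : List (String × Int)) : Decidable (Spec_count_relation_pair superset_list out) := by unfold Spec_count_relation_pair; infer_instance

-- ===== CLAIM (what is proved, stated in full; the proofs are below) =====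
def Claim_equal_count_relation_pair : Prop := ∀ (superset_list : List (List String)), Dom_count_relation_pair superset_list → Pre_count_relation_pair superset_list → Spec_count_relation_pair superset_list (count_relation_pair superset_list)

-- ===== LEMMAS AND PROOFS =====

-- proof-side abbreviations
def pvUpd (d : PySem.Dict String Int) (k : String) : PySem.Dict String Int :=
  d.insert k (d.getD k 0 + 1)

def pvStepA (d : PySem.Dict String Int) (p : String × String) : PySem.Dict String Int :=
  pvCountKey (pvCountKey d (pvKey p.1 p.2)) (pvKey p.2 p.1)

def pvStepB (d : PySem.Dict (String × String) Int) (p : String × String) : PySem.Dict (String × String) Int :=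
  pvCanonStep d p.1 p.2

-- one counter entry expanded into its directed items
def pvExpand (pv : (String × String) × Int) : List (String × Int) :=
  if pv.1.1 = pv.1.2 then [(pvKey pv.1.1 pv.1.2, 2 * pv.2)]
  else [(pvKey pv.1.1 pv.1.2, pv.2), (pvKey pv.1.2 pv.1.1, pv.2)]

-- the invariant carried over B's counter dict, relative to the pair universe D
structure PvInv (D : List (String × String)) (dB : PySem.Dict (String × String) Int) : Prop where
  mem : ∀ p ∈ dB.keys, p ∈ D
  nd : dB.keys.Nodup
  can : ∀ a b, (a, b) ∈ dB.keys → (b, a) ∈ dB.keys → a = b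

lemma pvCountKey_eq (d : PySem.Dict String Int) (k : String) : pvCountKey d k = pvUpd d k := by
  unfold pvCountKey pvUpd
  split
  · next h =>
    rw [PySem.Dict.getD_of_not_contains d 0 h]
    norm_num
  · rfl

-- A's nested range loops over one superset compute the fold of pvStepA over pvTri
lemma pv_Ainner (s : List String) (x : String) :
    ∀ (n k : Nat), s.length - k = n → k ≤ s.length → ∀ d,
    (PySem.List.pyRange (k : Int) (s.length : Int) 1).foldl (fun d j =>
        pvCountKey (pvCountKey d (x ++ "#" ++ PySem.List.pyGetD s j ""))
          (PySem.List.pyGetD s j "" ++ "#" ++ x)) d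
      = ((s.drop k).map (fun b => (x, b))).foldl pvStepA d := by
  intro n
  induction n with
  | zero =>
    intro k hnk hk d
    have hk' : k = s.length := by omega
    subst hk'
    simp [PySem.List.pyRange, List.drop_length]
  | succ n ih =>
    intro k hnk hk d
    have hlt : k < s.length := by omega
    rw [PySem.List.pyRange_one_cons (by exact_mod_cast hlt)]
    rw [List.drop_eq_getElem_cons hlt, List.map_cons]
    simp only [List.foldl_cons]
    rw [PySem.List.pyGetD_natCast, List.getD_eq_getElem s "" hlt]
    rw [show ((k : Int) + 1) = (((k + 1 : Nat)) : Int) by push_cast; ring]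
    rw [ih (k + 1) (by omega) (by omega)]
    rfl

lemma pv_Aouter (s : List String) :
    ∀ (n k : Nat), s.length - k = n → k ≤ s.length → ∀ d,
    (PySem.List.pyRange (k : Int) (s.length : Int) 1).foldl (fun d i =>
      (PySem.List.pyRange (i + 1) (s.length : Int) 1).foldl (fun d j =>
        pvCountKey (pvCountKey d (PySem.List.pyGetD s i "" ++ "#" ++ PySem.List.pyGetD s j ""))
          (PySem.List.pyGetD s j "" ++ "#" ++ PySem.List.pyGetD s i "")) d) d
      = (pvTri (s.drop k)).foldl pvStepA d := by
  intro n
  induction n with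
  | zero =>
    intro k hnk hk d
    have hk' : k = s.length := by omega
    subst hk'
    simp [PySem.List.pyRange, List.drop_length, pvTri]
  | succ n ih =>
    intro k hnk hk d
    have hlt : k < s.length := by omega
    rw [PySem.List.pyRange_one_cons (by exact_mod_cast hlt)]
    simp only [List.foldl_cons]
    conv_lhs =>
      rw [show ((k : Int) + 1) = (((k + 1 : Nat)) : Int) by push_cast; ring,
          PySem.List.pyGetD_natCast, List.getD_eq_getElem s "" hlt,
          pv_Ainner s s[k] (s.length - (k + 1)) (k + 1) rfl (by omega)]
    rw [show s.drop k = s[k] :: s.drop (k + 1) from List.drop_eq_getElem_cons hlt]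
    rw [show pvTri (s[k] :: s.drop (k + 1))
          = (s.drop (k + 1)).map (fun b => (s[k], b)) ++ pvTri (s.drop (k + 1)) from rfl]
    rw [List.foldl_append]
    exact ih (k + 1) (by omega) (by omega) _

-- B's enumerate/slice loops over one superset compute the fold of any step over pvTri
lemma pv_Btri {delta : Type} (f : delta → String × String → delta) (s : List String) :
    ∀ (n k : Nat), s.length - k = n → k ≤ s.length → ∀ (d : delta),
    (PySem.List.enumerate (s.drop k) (k : Int)).foldl (fun d ia =>
      (PySem.List.slice s (some (ia.1 + 1)) none).foldl (fun d b => f d (ia.2, b)) d) d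
      = (pvTri (s.drop k)).foldl f d := by
  intro n
  induction n with
  | zero =>
    intro k hnk hk d
    have hk' : k = s.length := by omega
    subst hk'
    simp [List.drop_length, PySem.List.enumerate_nil, pvTri]
  | succ n ih =>
    intro k hnk hk d
    have hlt : k < s.length := by omega
    rw [List.drop_eq_getElem_cons hlt, PySem.List.enumerate_cons]
    simp only [List.foldl_cons]
    have hcast : ((k : Int) + 1) = (((k + 1 : Nat)) : Int) := by push_cast; ring
    have hslice : PySem.List.slice s (some ((k : Int) + 1)) none = s.drop (k + 1) := by
      rw [hcast, PySem.List.slice_from s (by positivity)]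
      simp
    rw [hslice]
    rw [show pvTri (s[k] :: s.drop (k + 1))
          = (s.drop (k + 1)).map (fun b => (s[k], b)) ++ pvTri (s.drop (k + 1)) from rfl]
    rw [List.foldl_append, ← List.foldl_map]
    rw [hcast, ih (k + 1) (by omega) (by omega)]

-- the directed string keys one counter entry expands to
lemma pv_mem_keysE {e : (String × String) × Int} {k : String} :
    k ∈ (pvExpand e).map Prod.fst ↔ k = pvKey e.1.1 e.1.2 ∨ k = pvKey e.1.2 e.1.1 := by
  unfold pvExpand
  split
  · next h => rw [h]; simp
  · simp

-- membership of a directed string key in the expanded items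
lemma pv_mem_keysA {l : List ((String × String) × Int)} {k : String} :
    k ∈ (l.flatMap pvExpand).map Prod.fst ↔
      ∃ p ∈ l.map Prod.fst, k = pvKey p.1 p.2 ∨ k = pvKey p.2 p.1 := by
  constructor
  · intro hk
    rw [List.map_flatMap] at hk
    obtain ⟨e, he, hke⟩ := List.mem_flatMap.mp hk
    exact ⟨e.1, List.mem_map.mpr ⟨e, he, rfl⟩, pv_mem_keysE.mp hke⟩
  · rintro ⟨p, hp, hkp⟩
    obtain ⟨e, he, rfl⟩ := List.mem_map.mp hp
    rw [List.map_flatMap]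
    exact List.mem_flatMap.mpr ⟨e, he, pv_mem_keysE.mpr hkp⟩

-- the expanded items list has pairwise distinct string keys
lemma pv_nodup_gen (D : List (String × String))
    (hswap : ∀ p ∈ D, (p.2, p.1) ∈ D)
    (hinj : ∀ p ∈ D, ∀ q ∈ D, pvKey p.1 p.2 = pvKey q.1 q.2 → p = q)
    (l : List ((String × String) × Int))
    (hmem : ∀ p ∈ l.map Prod.fst, p ∈ D)
    (hnd : (l.map Prod.fst).Nodup)
    (hcan : ∀ a b, (a, b) ∈ l.map Prod.fst → (b, a) ∈ l.map Prod.fst → a = b) :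
    ((l.flatMap pvExpand).map Prod.fst).Nodup := by
  induction l with
  | nil => simp
  | cons e t ih =>
    have hfe := hmem e.1 (List.mem_map.mpr ⟨e, List.mem_cons_self, rfl⟩)
    simp only [List.flatMap_cons, List.map_append, List.nodup_append]
    refine ⟨?_, ?_, ?_⟩
    · unfold pvExpand
      split
      · simp
      · next hne =>
        simp only [List.map_cons, List.map_nil, List.nodup_cons, List.mem_singleton,
          List.nodup_nil, and_true]
        exact ⟨fun hcontra =>
          hne (Prod.ext_iff.mp (hinj e.1 hfe (e.1.2, e.1.1) (hswap e.1 hfe) hcontra)).1, by simp⟩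
    · exact ih (fun p hp => hmem p (List.mem_cons_of_mem _ (by simpa using hp)))
        ((List.nodup_cons.mp (by simpa using hnd)).2)
        (fun a b ha hb => hcan a b (List.mem_cons_of_mem _ (by simpa using ha))
          (List.mem_cons_of_mem _ (by simpa using hb)))
    · intro k hk1 k2 hk2 heq
      subst heq
      obtain ⟨p, hp, hkp⟩ := pv_mem_keysA.mp hk2
      have hpD := hmem p (List.mem_cons_of_mem _ (by simpa using hp))
      have hk1' := pv_mem_keysE.mp hk1
      have hnd' : e.1 ∉ t.map Prod.fst := (List.nodup_cons.mp (by simpa using hnd)).1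
      -- each combination forces p = e.1 or p = (e.1.2, e.1.1)
      have hpe : p = e.1 ∨ p = (e.1.2, e.1.1) := by
        rcases hk1' with rfl | rfl <;> rcases hkp with h | h
        · exact Or.inl (hinj e.1 hfe p hpD h).symm
        · have hq := Prod.ext_iff.mp (hinj e.1 hfe (p.2, p.1) (hswap p hpD) h)
          exact Or.inr (Prod.ext_iff.mpr ⟨hq.2.symm, hq.1.symm⟩)
        · exact Or.inr (hinj (e.1.2, e.1.1) (hswap e.1 hfe) p hpD h).symm
        · have hq := Prod.ext_iff.mp (hinj (e.1.2, e.1.1) (hswap e.1 hfe) (p.2, p.1) (hswap p hpD) h)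
          exact Or.inl (Prod.ext_iff.mpr ⟨hq.2.symm, hq.1.symm⟩)
      rcases hpe with rfl | rfl
      · exact hnd' (by simpa using hp)
      · have hself : e.1.1 = e.1.2 := by
          refine hcan e.1.1 e.1.2 (List.mem_map.mpr ⟨e, List.mem_cons_self, rfl⟩) ?_
          exact List.mem_cons_of_mem _ (by simpa using hp)
        apply hnd'
        have : (e.1.2, e.1.1) = e.1 := by
          rw [Prod.ext_iff]; exact ⟨hself.symm, hself⟩
        rw [← this]
        simpa using hp

-- updating an existing key rewrites the items list in place
lemma pv_items_update {kk nu : Type} [BEq kk] [LawfulBEq kk] (d : PySem.Dict kk nu)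
    (L1 L2 : List (kk × nu)) (k : kk) (v w : nu)
    (h : d.items = L1 ++ (k, v) :: L2) (hnd : d.keys.Nodup) :
    (d.insert k w).items = L1 ++ (k, w) :: L2 := by
  have hkmem : k ∈ d.keys := by
    simp only [PySem.Dict.keys, h, List.map_append, List.map_cons]
    exact List.mem_append.mpr (Or.inr List.mem_cons_self)
  have hc : d.contains k = true := (PySem.Dict.contains_iff_mem_keys _ _).mpr hkmem
  have hnd' : k ∉ L1.map Prod.fst ∧ k ∉ L2.map Prod.fst := by
    have h2 := hnd
    simp only [PySem.Dict.keys, h, List.map_append, List.map_cons] at h2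
    have h3 := List.nodup_middle.mp h2
    have := (List.nodup_cons.mp h3).1
    simp only [List.mem_append] at this
    exact ⟨fun hx => this (Or.inl hx), fun hx => this (Or.inr hx)⟩
  rw [PySem.Dict.items_insert_of_contains _ _ hc, h]
  rw [List.map_append, List.map_cons]
  congr 1
  · conv_rhs => rw [← List.map_id L1]
    refine List.map_congr_left (fun p hp => ?_)
    have : p.1 ≠ k := fun hh => hnd'.1 (hh ▸ List.mem_map.mpr ⟨p, hp, rfl⟩)
    simp [this]
  · congr 1
    · simp
    · conv_rhs => rw [← List.map_id L2]
      refine List.map_congr_left (fun p hp => ?_)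
      have : p.1 ≠ k := fun hh => hnd'.2 (hh ▸ List.mem_map.mpr ⟨p, hp, rfl⟩)
      simp [this]

-- a contained key splits the items list
lemma pv_split_of_contains {kk nu : Type} [BEq kk] [LawfulBEq kk] (d : PySem.Dict kk nu)
    (k : kk) (h : d.contains k = true) :
    ∃ L1 v L2, d.items = L1 ++ (k, v) :: L2 := by
  have hk : k ∈ d.keys := (PySem.Dict.contains_iff_mem_keys _ _).mp h
  simp only [PySem.Dict.keys, List.mem_map] at hk
  obtain ⟨e, he, hek⟩ := hk
  obtain ⟨L1, L2, hsplit⟩ := List.append_of_mem he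
  refine ⟨L1, e.2, L2, ?_⟩
  rw [hsplit]
  congr 1
  rw [show (k, e.2) = e from by cases e; cases hek; rfl]

-- one counting step preserves the invariant and the expansion equation
lemma pv_step (D : List (String × String))
    (hswap : ∀ p ∈ D, (p.2, p.1) ∈ D)
    (hinj : ∀ p ∈ D, ∀ q ∈ D, pvKey p.1 p.2 = pvKey q.1 q.2 → p = q)
    (dB : PySem.Dict (String × String) Int) (dA : PySem.Dict String Int)
    (a b : String) (hpD : (a, b) ∈ D) (hInv : PvInv D dB)
    (hEQ : dA.items = dB.items.flatMap pvExpand) :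
    PvInv D (pvStepB dB (a, b)) ∧
      (pvStepA dA (a, b)).items = (pvStepB dB (a, b)).items.flatMap pvExpand := by
  have hndA0 : ((dB.items.flatMap pvExpand).map Prod.fst).Nodup :=
    pv_nodup_gen D hswap hinj dB.items hInv.mem hInv.nd hInv.can
  have hndAkeys : dA.keys.Nodup := by
    simp only [PySem.Dict.keys, hEQ]
    exact hndA0
  simp only [pvStepB, pvCanonStep, pvStepA, pvCountKey_eq]
  by_cases h1 : dB.contains (a, b) = true
  · -- the pair is already counted under orientation (a, b)
    rw [if_pos h1]
    obtain ⟨L1, v, L2, hsplit⟩ := pv_split_of_contains dB _ h1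
    have hgv : dB.getD (a, b) 0 = v :=
      PySem.Dict.getD_of_mem_items _ (by rw [hsplit]; exact List.mem_append.mpr (Or.inr List.mem_cons_self)) hInv.nd 0
    have hB' : (dB.insert (a, b) (dB.getD (a, b) 0 + 1)).items = L1 ++ ((a, b), v + 1) :: L2 := by
      rw [hgv]; exact pv_items_update dB L1 L2 _ v _ hsplit hInv.nd
    have hkeys' : (dB.insert (a, b) (dB.getD (a, b) 0 + 1)).keys = dB.keys := by
      simp only [PySem.Dict.keys, hB', hsplit, List.map_append, List.map_cons]
    have hInv' : PvInv D (dB.insert (a, b) (dB.getD (a, b) 0 + 1)) := by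
      refine ⟨?_, ?_, ?_⟩ <;> rw [hkeys']
      exacts [hInv.mem, hInv.nd, hInv.can]
    refine ⟨hInv', ?_⟩
    rw [hB', List.flatMap_append, List.flatMap_cons]
    have hEQ' : dA.items = L1.flatMap pvExpand ++ pvExpand ((a, b), v) ++ L2.flatMap pvExpand := by
      rw [hEQ, hsplit, List.flatMap_append, List.flatMap_cons, List.append_assoc]
    by_cases hab : a = b
    · subst hab
      have hExp : pvExpand ((a, a), v) = [(pvKey a a, 2 * v)] := by simp [pvExpand]
      have hitems : dA.items = L1.flatMap pvExpand ++ (pvKey a a, 2 * v) :: L2.flatMap pvExpand := by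
        rw [hEQ', hExp]; simp
      have hg1 : dA.getD (pvKey a a) 0 = 2 * v :=
        PySem.Dict.getD_of_mem_items _ (by rw [hitems]; exact List.mem_append.mpr (Or.inr List.mem_cons_self)) hndAkeys 0
      have hu1 : (pvUpd dA (pvKey a a)).items
          = L1.flatMap pvExpand ++ (pvKey a a, 2 * v + 1) :: L2.flatMap pvExpand := by
        unfold pvUpd; rw [hg1]; exact pv_items_update dA _ _ _ _ _ hitems hndAkeys
      have hkA1 : (pvUpd dA (pvKey a a)).keys.Nodup := by
        simp only [PySem.Dict.keys, hu1]
        have := hndA0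
        rw [hEQ] at hitems
        rw [hitems] at this
        simpa using this
      have hg2 : (pvUpd dA (pvKey a a)).getD (pvKey a a) 0 = 2 * v + 1 :=
        PySem.Dict.getD_of_mem_items _ (by rw [hu1]; exact List.mem_append.mpr (Or.inr List.mem_cons_self)) hkA1 0
      show ((pvUpd dA (pvKey a a)).insert (pvKey a a)
        ((pvUpd dA (pvKey a a)).getD (pvKey a a) 0 + 1)).items = _
      rw [hg2, pv_items_update _ _ _ _ _ _ hu1 hkA1]
      have h2v : 2 * v + 1 + 1 = 2 * (v + 1) := by ring
      simp [pvExpand, h2v]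
    · have hExp : pvExpand ((a, b), v) = [(pvKey a b, v), (pvKey b a, v)] := by simp [pvExpand, hab]
      have hitems : dA.items
          = L1.flatMap pvExpand ++ (pvKey a b, v) :: (pvKey b a, v) :: L2.flatMap pvExpand := by
        rw [hEQ', hExp]; simp
      have hg1 : dA.getD (pvKey a b) 0 = v :=
        PySem.Dict.getD_of_mem_items _ (by rw [hitems]; exact List.mem_append.mpr (Or.inr List.mem_cons_self)) hndAkeys 0
      have hu1 : (pvUpd dA (pvKey a b)).items
          = L1.flatMap pvExpand ++ (pvKey a b, v + 1) :: (pvKey b a, v) :: L2.flatMap pvExpand := by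
        unfold pvUpd; rw [hg1]; exact pv_items_update dA _ _ _ _ _ hitems hndAkeys
      have hkA1 : (pvUpd dA (pvKey a b)).keys.Nodup := by
        simp only [PySem.Dict.keys, hu1]
        have := hndA0
        rw [hEQ] at hitems
        rw [hitems] at this
        simpa using this
      have hu1' : (pvUpd dA (pvKey a b)).items
          = (L1.flatMap pvExpand ++ [(pvKey a b, v + 1)]) ++ (pvKey b a, v) :: L2.flatMap pvExpand := by
        rw [hu1]; simp
      have hg2 : (pvUpd dA (pvKey a b)).getD (pvKey b a) 0 = v :=
        PySem.Dict.getD_of_mem_items _ (by rw [hu1']; exact List.mem_append.mpr (Or.inr List.mem_cons_self)) hkA1 0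
      show ((pvUpd dA (pvKey a b)).insert (pvKey b a)
        ((pvUpd dA (pvKey a b)).getD (pvKey b a) 0 + 1)).items = _
      rw [hg2, pv_items_update _ _ _ _ _ _ hu1' hkA1]
      simp [pvExpand, hab]
  · rw [if_neg h1]
    have hmem1 : (a, b) ∉ dB.keys := fun hm => by
      rw [(PySem.Dict.contains_iff_mem_keys _ _).mpr hm] at h1; exact h1 rfl
    by_cases h2 : dB.contains (b, a) = true
    · -- counted under the reversed orientation (b, a)
      rw [if_pos h2]
      have hab : a ≠ b := by
        intro h
        subst h
        exact hmem1 ((PySem.Dict.contains_iff_mem_keys _ _).mp h2)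
      have hba : b ≠ a := fun h => hab h.symm
      obtain ⟨L1, v, L2, hsplit⟩ := pv_split_of_contains dB _ h2
      have hgv : dB.getD (b, a) 0 = v :=
        PySem.Dict.getD_of_mem_items _ (by rw [hsplit]; exact List.mem_append.mpr (Or.inr List.mem_cons_self)) hInv.nd 0
      have hB' : (dB.insert (b, a) (dB.getD (b, a) 0 + 1)).items = L1 ++ ((b, a), v + 1) :: L2 := by
        rw [hgv]; exact pv_items_update dB L1 L2 _ v _ hsplit hInv.nd
      have hkeys' : (dB.insert (b, a) (dB.getD (b, a) 0 + 1)).keys = dB.keys := by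
        simp only [PySem.Dict.keys, hB', hsplit, List.map_append, List.map_cons]
      have hInv' : PvInv D (dB.insert (b, a) (dB.getD (b, a) 0 + 1)) := by
        refine ⟨?_, ?_, ?_⟩ <;> rw [hkeys']
        exacts [hInv.mem, hInv.nd, hInv.can]
      refine ⟨hInv', ?_⟩
      rw [hB', List.flatMap_append, List.flatMap_cons]
      have hExp : pvExpand ((b, a), v) = [(pvKey b a, v), (pvKey a b, v)] := by
        simp [pvExpand, hba]
      have hitems : dA.items
          = L1.flatMap pvExpand ++ (pvKey b a, v) :: (pvKey a b, v) :: L2.flatMap pvExpand := by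
        rw [hEQ, hsplit, List.flatMap_append, List.flatMap_cons, hExp]
        simp
      have hitems' : dA.items
          = (L1.flatMap pvExpand ++ [(pvKey b a, v)]) ++ (pvKey a b, v) :: L2.flatMap pvExpand := by
        rw [hitems]; simp
      have hg1 : dA.getD (pvKey a b) 0 = v :=
        PySem.Dict.getD_of_mem_items _ (by rw [hitems']; exact List.mem_append.mpr (Or.inr List.mem_cons_self)) hndAkeys 0
      have hu1 : (pvUpd dA (pvKey a b)).items
          = (L1.flatMap pvExpand ++ [(pvKey b a, v)]) ++ (pvKey a b, v + 1) :: L2.flatMap pvExpand := by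
        unfold pvUpd; rw [hg1]; exact pv_items_update dA _ _ _ _ _ hitems' hndAkeys
      have hkA1 : (pvUpd dA (pvKey a b)).keys.Nodup := by
        simp only [PySem.Dict.keys, hu1]
        have := hndA0
        rw [hEQ] at hitems'
        rw [hitems'] at this
        simpa using this
      have hu1' : (pvUpd dA (pvKey a b)).items
          = L1.flatMap pvExpand ++ (pvKey b a, v) :: (pvKey a b, v + 1) :: L2.flatMap pvExpand := by
        rw [hu1]; simp
      have hg2 : (pvUpd dA (pvKey a b)).getD (pvKey b a) 0 = v :=
        PySem.Dict.getD_of_mem_items _ (by rw [hu1']; exact List.mem_append.mpr (Or.inr List.mem_cons_self)) hkA1 0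
      show ((pvUpd dA (pvKey a b)).insert (pvKey b a)
        ((pvUpd dA (pvKey a b)).getD (pvKey b a) 0 + 1)).items = _
      rw [hg2, pv_items_update _ _ _ _ _ _ hu1' hkA1]
      simp [pvExpand, hba]
    · -- a fresh pair: appended under orientation (a, b)
      rw [if_neg h2]
      have hmem2 : (b, a) ∉ dB.keys := fun hm => by
        rw [(PySem.Dict.contains_iff_mem_keys _ _).mpr hm] at h2; exact h2 rfl
      have hBit : (dB.insert (a, b) 1).items = dB.items ++ [((a, b), 1)] :=
        PySem.Dict.items_insert_of_not_contains _ _ (by simpa using h1)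
      have hBkeys : (dB.insert (a, b) 1).keys = dB.keys ++ [(a, b)] := by
        simp only [PySem.Dict.keys, hBit, List.map_append, List.map_cons, List.map_nil]
      have hInv' : PvInv D (dB.insert (a, b) 1) := by
        refine ⟨?_, ?_, ?_⟩ <;> rw [hBkeys]
        · intro p hp
          rcases List.mem_append.mp hp with h | h
          · exact hInv.mem p h
          · rw [List.mem_singleton.mp h]; exact hpD
        · simp only [List.nodup_append, List.nodup_cons, List.nodup_nil]
          refine ⟨hInv.nd, by simp, ?_⟩
          intro p hp q hq heq
          rw [heq, List.mem_singleton.mp hq] at hp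
          exact hmem1 hp
        · intro x y hx hy
          rcases List.mem_append.mp hx with hx | hx <;> rcases List.mem_append.mp hy with hy | hy
          · exact hInv.can x y hx hy
          · have h := Prod.mk.inj (List.mem_singleton.mp hy)
            rw [h.1, h.2] at hx
            exact absurd hx hmem2
          · have h := Prod.mk.inj (List.mem_singleton.mp hx)
            rw [h.1, h.2] at hy
            exact absurd hy hmem2
          · have h := Prod.mk.inj (List.mem_singleton.mp hx)
            have h' := Prod.mk.inj (List.mem_singleton.mp hy)
            rw [h.1]
            exact h'.1.symm
      refine ⟨hInv', ?_⟩
      -- neither directed key is present on A's side yet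
      have hnotA : ∀ k : String, (k = pvKey a b ∨ k = pvKey b a) → k ∉ (dB.items.flatMap pvExpand).map Prod.fst := by
        intro k hk hkmem
        obtain ⟨p, hp, hkp⟩ := pv_mem_keysA.mp hkmem
        have hpD' := hInv.mem p hp
        have : p = (a, b) ∨ p = (b, a) := by
          rcases hk with rfl | rfl <;> rcases hkp with h | h
          · exact Or.inl (hinj (a, b) hpD p hpD' h).symm
          · have hq := Prod.ext_iff.mp (hinj (a, b) hpD (p.2, p.1) (hswap p hpD') h)
            exact Or.inr (Prod.ext_iff.mpr ⟨hq.2.symm, hq.1.symm⟩)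
          · exact Or.inr (hinj (b, a) (hswap _ hpD) p hpD' h).symm
          · have hq := Prod.ext_iff.mp (hinj (b, a) (hswap _ hpD) (p.2, p.1) (hswap p hpD') h)
            exact Or.inl (Prod.ext_iff.mpr ⟨hq.2.symm, hq.1.symm⟩)
        rcases this with rfl | rfl
        · exact hmem1 hp
        · exact hmem2 hp
      have hcA1 : dA.contains (pvKey a b) = false := by
        by_contra hcon
        have h : dA.contains (pvKey a b) = true := by
          cases hx : dA.contains (pvKey a b)
          · exact absurd hx hcon
          · rfl
        exact (hnotA _ (Or.inl rfl)) (by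
          simpa only [PySem.Dict.keys, hEQ] using (PySem.Dict.contains_iff_mem_keys _ _).mp h)
      have hg1 : dA.getD (pvKey a b) 0 = 0 := PySem.Dict.getD_of_not_contains dA 0 hcA1
      have hu1 : (pvUpd dA (pvKey a b)).items = dA.items ++ [(pvKey a b, 0 + 1)] := by
        unfold pvUpd
        rw [hg1]
        exact PySem.Dict.items_insert_of_not_contains dA _ hcA1
      rw [hBit, List.flatMap_append, List.flatMap_cons, List.flatMap_nil, List.append_nil]
      by_cases hab : a = b
      · subst hab
        have hkA1 : (pvUpd dA (pvKey a a)).keys.Nodup := by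
          simp only [PySem.Dict.keys, hu1, List.map_append, List.map_cons, List.map_nil]
          simp only [List.nodup_append, List.nodup_cons, List.nodup_nil]
          refine ⟨by simpa only [hEQ] using hndA0, by simp, ?_⟩
          intro p hp q hq heq
          rw [heq, List.mem_singleton.mp hq] at hp
          exact hnotA (pvKey a a) (Or.inl rfl) (by simpa only [hEQ] using hp)
        have hg2 : (pvUpd dA (pvKey a a)).getD (pvKey a a) 0 = 0 + 1 :=
          PySem.Dict.getD_of_mem_items _ (by rw [hu1]; exact List.mem_append.mpr (Or.inr List.mem_cons_self)) hkA1 0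
        show ((pvUpd dA (pvKey a a)).insert (pvKey a a)
          ((pvUpd dA (pvKey a a)).getD (pvKey a a) 0 + 1)).items = _
        rw [hg2, pv_items_update _ dA.items [] _ (0 + 1) _ hu1 hkA1, hEQ]
        simp [pvExpand]
      · have hcA2 : (pvUpd dA (pvKey a b)).contains (pvKey b a) = false := by
          unfold pvUpd
          rw [PySem.Dict.contains_insert]
          have h1' : (pvKey b a == pvKey a b) = false := by
            simp only [beq_eq_false_iff_ne, ne_eq]
            exact fun h => hab (Prod.ext_iff.mp (hinj (b, a) (hswap _ hpD) (a, b) hpD h)).1.symm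
          have h2' : dA.contains (pvKey b a) = false := by
            by_contra hcon
            have h : dA.contains (pvKey b a) = true := by
              cases hx : dA.contains (pvKey b a)
              · exact absurd hx hcon
              · rfl
            exact (hnotA _ (Or.inr rfl)) (by
              simpa only [PySem.Dict.keys, hEQ] using (PySem.Dict.contains_iff_mem_keys _ _).mp h)
          rw [h1', h2']
          rfl
        have hg2 : (pvUpd dA (pvKey a b)).getD (pvKey b a) 0 = 0 :=
          PySem.Dict.getD_of_not_contains _ 0 hcA2
        show ((pvUpd dA (pvKey a b)).insert (pvKey b a)
          ((pvUpd dA (pvKey a b)).getD (pvKey b a) 0 + 1)).items = _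
        rw [hg2, PySem.Dict.items_insert_of_not_contains _ _ hcA2, hu1, hEQ]
        simp [pvExpand, hab]

lemma pv_main (D : List (String × String))
    (hswap : ∀ p ∈ D, (p.2, p.1) ∈ D)
    (hinj : ∀ p ∈ D, ∀ q ∈ D, pvKey p.1 p.2 = pvKey q.1 q.2 → p = q)
    (ps : List (String × String)) :
    ∀ (dB : PySem.Dict (String × String) Int) (dA : PySem.Dict String Int),
    (∀ p ∈ ps, p ∈ D) → PvInv D dB → dA.items = dB.items.flatMap pvExpand →
    PvInv D (ps.foldl pvStepB dB) ∧
      (ps.foldl pvStepA dA).items = (ps.foldl pvStepB dB).items.flatMap pvExpand := by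
  induction ps with
  | nil => exact fun dB dA _ hInv hEQ => ⟨hInv, hEQ⟩
  | cons p t ih =>
    intro dB dA hhf hInv hEQ
    have hstep := pv_step D hswap hinj dB dA p.1 p.2 (hhf p List.mem_cons_self) hInv hEQ
    simp only [List.foldl_cons]
    exact ih _ _ (fun q hq => hhf q (List.mem_cons_of_mem _ hq)) hstep.1 hstep.2

-- B's expansion loop materialises the expanded items list
lemma pv_directed (l : List ((String × String) × Int)) :
    ∀ (d : PySem.Dict String Int),
    ((l.flatMap pvExpand).map Prod.fst).Nodup →
    (∀ k ∈ (l.flatMap pvExpand).map Prod.fst, d.contains k = false) →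
    (l.foldl (fun d pv =>
      if pv.1.1 == pv.1.2 then d.insert (pv.1.1 ++ "#" ++ pv.1.2) (2 * pv.2)
      else (d.insert (pv.1.1 ++ "#" ++ pv.1.2) pv.2).insert (pv.1.2 ++ "#" ++ pv.1.1) pv.2) d).items
      = d.items ++ l.flatMap pvExpand := by
  induction l with
  | nil =>
    intro d _ _
    simp
  | cons e t ih =>
    intro d hnod hdis
    have hnod' := hnod
    simp only [List.flatMap_cons, List.map_append, List.nodup_append] at hnod'
    obtain ⟨hnodE, hnodT, hdisj⟩ := hnod'
    have hheadsub : ∀ k ∈ (pvExpand e).map Prod.fst, d.contains k = false := fun k hk =>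
      hdis k (by
        simp only [List.flatMap_cons, List.map_append]
        exact List.mem_append.mpr (Or.inl hk))
    have htailmem : ∀ k ∈ (t.flatMap pvExpand).map Prod.fst, d.contains k = false := fun k hk =>
      hdis k (by
        simp only [List.flatMap_cons, List.map_append]
        exact List.mem_append.mpr (Or.inr hk))
    simp only [List.foldl_cons, List.flatMap_cons]
    by_cases hab : e.1.1 = e.1.2
    · rw [if_pos (beq_iff_eq.mpr hab)]
      have hc : d.contains (pvKey e.1.1 e.1.2) = false :=
        hheadsub _ (pv_mem_keysE.mpr (Or.inl rfl))
      have hit : (d.insert (e.1.1 ++ "#" ++ e.1.2) (2 * e.2)).items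
          = d.items ++ [(pvKey e.1.1 e.1.2, 2 * e.2)] :=
        PySem.Dict.items_insert_of_not_contains d _ hc
      rw [ih _ hnodT (fun k hk => by
        show (d.insert (e.1.1 ++ "#" ++ e.1.2) (2 * e.2)).contains k = false
        rw [show (e.1.1 ++ "#" ++ e.1.2) = pvKey e.1.1 e.1.2 from rfl,
          PySem.Dict.contains_insert]
        have h1 : (k == pvKey e.1.1 e.1.2) = false := by
          simp only [beq_eq_false_iff_ne, ne_eq]
          exact fun h => hdisj _ (pv_mem_keysE.mpr (Or.inl rfl)) _ hk h.symm
        rw [h1, htailmem k hk]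
        rfl), hit]
      have hExp : pvExpand e = [(pvKey e.1.1 e.1.2, 2 * e.2)] := by
        simp [pvExpand, hab]
      rw [hExp]
      simp
    · rw [if_neg (by simpa using hab)]
      have hc1 : d.contains (pvKey e.1.1 e.1.2) = false :=
        hheadsub _ (pv_mem_keysE.mpr (Or.inl rfl))
      have hkk : pvKey e.1.2 e.1.1 ≠ pvKey e.1.1 e.1.2 := by
        have : (pvExpand e).map Prod.fst = [pvKey e.1.1 e.1.2, pvKey e.1.2 e.1.1] := by
          simp [pvExpand, hab]
        rw [this] at hnodE
        exact fun h => (List.nodup_cons.mp hnodE).1 (h ▸ List.mem_cons_self)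
      have hc2 : (d.insert (pvKey e.1.1 e.1.2) e.2).contains (pvKey e.1.2 e.1.1) = false := by
        rw [PySem.Dict.contains_insert]
        rw [beq_eq_false_iff_ne.mpr hkk, hheadsub _ (pv_mem_keysE.mpr (Or.inr rfl))]
        rfl
      have hit : ((d.insert (e.1.1 ++ "#" ++ e.1.2) e.2).insert (e.1.2 ++ "#" ++ e.1.1) e.2).items
          = d.items ++ [(pvKey e.1.1 e.1.2, e.2)] ++ [(pvKey e.1.2 e.1.1, e.2)] := by
        show ((d.insert (pvKey e.1.1 e.1.2) e.2).insert (pvKey e.1.2 e.1.1) e.2).items = _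
        rw [PySem.Dict.items_insert_of_not_contains _ _ hc2,
          PySem.Dict.items_insert_of_not_contains _ _ hc1]
      rw [ih _ hnodT (fun k hk => by
        show ((d.insert (e.1.1 ++ "#" ++ e.1.2) e.2).insert (e.1.2 ++ "#" ++ e.1.1) e.2).contains k = false
        rw [show (e.1.1 ++ "#" ++ e.1.2) = pvKey e.1.1 e.1.2 from rfl,
          show (e.1.2 ++ "#" ++ e.1.1) = pvKey e.1.2 e.1.1 from rfl,
          PySem.Dict.contains_insert, PySem.Dict.contains_insert]
        have h1 : (k == pvKey e.1.2 e.1.1) = false := by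
          simp only [beq_eq_false_iff_ne, ne_eq]
          exact fun h => hdisj _ (pv_mem_keysE.mpr (Or.inr rfl)) _ hk h.symm
        have h2 : (k == pvKey e.1.1 e.1.2) = false := by
          simp only [beq_eq_false_iff_ne, ne_eq]
          exact fun h => hdisj _ (pv_mem_keysE.mpr (Or.inl rfl)) _ hk h.symm
        rw [h1, h2, htailmem k hk]
        rfl), hit]
      have hExp : pvExpand e = [(pvKey e.1.1 e.1.2, e.2), (pvKey e.1.2 e.1.1, e.2)] := by
        simp [pvExpand, hab]
      rw [hExp]
      simp

-- ===== VERDICT (by name: the statement is the Claim_ definition above) =====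
theorem count_relation_pair_spec : Claim_equal_count_relation_pair := by
  intro L _hdom hpre
  show count_relation_pair L = count_relation_pair_alt L
  unfold count_relation_pair count_relation_pair_alt
  have hA : (fun (d : PySem.Dict String Int) (superset : List String) =>
      (PySem.List.pyRange 0 (superset.length : Int) 1).foldl (fun d i =>
        (PySem.List.pyRange (i + 1) (superset.length : Int) 1).foldl (fun d j =>
          pvCountKey (pvCountKey d (PySem.List.pyGetD superset i "" ++ "#" ++ PySem.List.pyGetD superset j ""))
            (PySem.List.pyGetD superset j "" ++ "#" ++ PySem.List.pyGetD superset i "")) d) d)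
      = fun d s => (pvTri s).foldl pvStepA d := by
    funext d s
    have h := pv_Aouter s s.length 0 (by omega) (by omega) d
    simpa using h
  have hB : (fun (d : PySem.Dict (String × String) Int) (superset : List String) =>
      (PySem.List.enumerate superset).foldl (fun d ia =>
        (PySem.List.slice superset (some (ia.1 + 1)) none).foldl (fun d b =>
          pvCanonStep d ia.2 b) d) d)
      = fun d s => (pvTri s).foldl pvStepB d := by
    funext d s
    have h := pv_Btri pvStepB s s.length 0 (by omega) (by omega) d
    simpa using h
  rw [hA, hB]
  dsimp only
  have hfoldA : L.foldl (fun d s => (pvTri s).foldl pvStepA d) PySem.Dict.empty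
      = (L.flatMap pvTri).foldl pvStepA PySem.Dict.empty := List.foldl_flatMap.symm
  have hfoldB : L.foldl (fun d s => (pvTri s).foldl pvStepB d) PySem.Dict.empty
      = (L.flatMap pvTri).foldl pvStepB PySem.Dict.empty := List.foldl_flatMap.symm
  rw [hfoldA, hfoldB]
  unfold Pre_count_relation_pair at hpre
  have hhfD : ∀ p ∈ L.flatMap pvTri, p ∈ pvDir L := by
    intro p hp
    exact List.mem_flatMap.mpr ⟨p, hp, by simp⟩
  have hswapD : ∀ p ∈ pvDir L, (p.2, p.1) ∈ pvDir L := by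
    intro p hp
    obtain ⟨q, hq, hpq⟩ := List.mem_flatMap.mp hp
    have hpq' : p = q ∨ p = (q.2, q.1) := by simpa using hpq
    rcases hpq' with rfl | rfl
    · exact List.mem_flatMap.mpr ⟨p, hq, by simp⟩
    · exact List.mem_flatMap.mpr ⟨q, hq, by simp⟩
  have hInv0 : PvInv (pvDir L) (PySem.Dict.empty : PySem.Dict (String × String) Int) := by
    refine ⟨?_, ?_, ?_⟩ <;> intros <;> simp_all [PySem.Dict.keys_empty]
  obtain ⟨hInvF, hEQF⟩ := pv_main (pvDir L) hswapD hpre (L.flatMap pvTri)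
    PySem.Dict.empty PySem.Dict.empty hhfD hInv0 rfl
  have hnodF : ((((L.flatMap pvTri).foldl pvStepB PySem.Dict.empty).items.flatMap pvExpand).map Prod.fst).Nodup :=
    pv_nodup_gen (pvDir L) hswapD hpre _ hInvF.mem hInvF.nd hInvF.can
  have hdir := pv_directed ((L.flatMap pvTri).foldl pvStepB PySem.Dict.empty).items
    PySem.Dict.empty hnodF (fun k _ => by simp [pysem])
  rw [hdir, ← hEQF]
  rfl
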